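-- pv_equiv track=rewrite | github.com/r5by/montgomery-ecc | examples/sm2_helper_mont.py | int_by_slider
-- ===== SOURCE A (Python) =====
-- def int_by_slider(n, d, i):
--     index = 0
--     r = 0
--
--     n >>= i  # Right shift n by i positions
--
--     while n > 0:
--         b = n & 1  # Get the least significant bit
--         r |= (b << index)  # Set the corresponding bit in r
--
--         n >>= d  # Right shift n by d positions
--         index += 1  # Move to the next bit position in r
--
--     return r
-- ===== SOURCE B (Python) =====
-- def int_by_slider(n, d, i):
--     m = n >> i
--     if m <= 0:
--         return 0
--     s = bin(m)[2:][::-1]      # binary digits of m, least-significant first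
--     return int(s[::d][::-1], 2)  # keep every d-th digit, read back as binary
-- ===== Notes on version B (the rewrite author's own statement) =====
-- stated objective: alternative
-- what changed: Instead of A's loop that repeatedly shifts the big integer and ORs single bits into an accumulator, B renders n>>i once as its binary string, selects every d-th character with a string slice, and parses the selected characters back with int(.,2).
import Mathlib
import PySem

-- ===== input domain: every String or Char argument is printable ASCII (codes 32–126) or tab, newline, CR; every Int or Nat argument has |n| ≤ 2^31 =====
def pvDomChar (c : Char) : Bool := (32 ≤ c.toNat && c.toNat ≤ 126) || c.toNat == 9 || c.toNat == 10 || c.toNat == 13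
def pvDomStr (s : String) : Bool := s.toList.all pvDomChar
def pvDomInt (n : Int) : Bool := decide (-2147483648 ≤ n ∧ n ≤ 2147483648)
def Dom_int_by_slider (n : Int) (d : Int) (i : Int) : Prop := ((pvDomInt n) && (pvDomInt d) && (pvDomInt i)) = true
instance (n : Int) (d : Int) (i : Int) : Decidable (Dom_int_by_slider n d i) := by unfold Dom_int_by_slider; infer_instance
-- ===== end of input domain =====

-- B replaces A's shift-and-OR while-loop over the integer by a binary-string pipeline:
-- render n>>i as its digit string, slice out every d-th digit, parse back (objective: alternative).

-- ===== PORT A =====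
-- termination helper for the while-loop (cited by decreasing_by)
theorem pvShiftToNatLt (n : Int) (h : 0 < n) (k : Nat) (hk : 1 ≤ k) :
    (n >>> k).toNat < n.toNat := by
  have h0 : n = ((n.toNat : Nat) : Int) := (Int.toNat_of_nonneg h.le).symm
  rw [h0, ← Int.natCast_shiftRight, Int.toNat_natCast, Int.toNat_natCast,
    Nat.shiftRight_eq_div_pow]
  exact Nat.div_lt_self (by omega) (Nat.one_lt_two_pow (by omega))

-- the `while n > 0` loop of A; state (n, index, r) exactly as in the Python.
-- For d ≤ 0 with n > 0 the Python raises ValueError (d < 0) or never terminates (d = 0);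
-- those inputs are outside Pre_ and the port returns 0 there.
def intBySliderGo (d : Int) (n : Int) (index : Nat) (r : Int) : Int :=
  if 0 < n then
    if 1 ≤ d then
      intBySliderGo d (n >>> d.toNat) (index + 1)
        (PySem.Int.bor r ((PySem.Int.band n 1) <<< index))
    else 0
  else r
termination_by n.toNat
decreasing_by exact pvShiftToNatLt n (by assumption) d.toNat (by omega)

-- `n >>= i` with i < 0 raises ValueError in Python (outside Pre_); the port returns 0 there.
def int_by_slider (n : Int) (d : Int) (i : Int) : Int :=
  if 0 ≤ i then intBySliderGo d (n >>> i.toNat) 0 0 else 0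

-- ===== PORT B =====
-- bin(m)[2:] for m > 0: the binary digit characters of m, most significant first.
def pvBinNat (m : Nat) : List Char :=
  if m = 0 then [] else pvBinNat (m / 2) ++ [if m % 2 = 1 then '1' else '0']

-- s[::d] for step d ≥ 1, ported by hand (exact there: indices 0, d, 2d, …);
-- d ≤ 0 raises/behaves differently in Python and is outside Pre_.
def pvTakeEvery (d : Nat) : List Char → List Char
  | [] => []
  | c :: rest => c :: pvTakeEvery d (rest.drop (d - 1))
termination_by xs => xs.length
decreasing_by simp

-- int(s, 2) on a string of '0'/'1' digits, most significant first.
def pvParse2 (s : List Char) : Nat :=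
  s.foldl (fun acc c => 2 * acc + (if c = '1' then 1 else 0)) 0

def int_by_slider_alt (n : Int) (d : Int) (i : Int) : Int :=
  if 0 ≤ i then
    let m := n >>> i.toNat
    if m ≤ 0 then 0
    else
      let s := (pvBinNat m.toNat).reverse            -- bin(m)[2:][::-1]
      ((pvParse2 (pvTakeEvery d.toNat s).reverse : Nat) : Int)  -- int(s[::d][::-1], 2)
  else 0

-- ===== PRECONDITION & SPEC =====
-- Pre_ excludes exactly the inputs on which the Python A raises or never returns:
-- i < 0 (ValueError on n >>= i), and d ≤ 0 while n >> i > 0 (ValueError on n >>= d for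
-- d < 0, infinite loop for d = 0).
def Pre_int_by_slider (n : Int) (d : Int) (i : Int) : Prop :=
  0 ≤ i ∧ (1 ≤ d ∨ n >>> i.toNat ≤ 0)
instance (n : Int) (d : Int) (i : Int) : Decidable (Pre_int_by_slider n d i) := by
  unfold Pre_int_by_slider; infer_instance

def pvWitness_int_by_slider : Int × Int × Int := (13, 2, 1)

def Spec_int_by_slider (n : Int) (d : Int) (i : Int) (out : Int) : Prop :=
  out = int_by_slider_alt n d i
instance (n : Int) (d : Int) (i : Int) (out : Int) : Decidable (Spec_int_by_slider n d i out) := by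
  unfold Spec_int_by_slider; infer_instance

-- ===== CLAIM =====
def Claim_equal_int_by_slider : Prop := ∀ (n : Int) (d : Int) (i : Int),
  Dom_int_by_slider n d i → Pre_int_by_slider n d i →
  Spec_int_by_slider n d i (int_by_slider n d i)

-- ===== LEMMAS AND PROOFS =====

-- the common value: bits of M at positions 0, D, 2D, … packed consecutively
def pvBitsum (D : Nat) (M : Nat) : Nat :=
  if M = 0 ∨ D = 0 then 0 else M % 2 + 2 * pvBitsum D (M / 2 ^ D)
termination_by M
decreasing_by exact Nat.div_lt_self (by omega) (Nat.one_lt_two_pow (by omega))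

-- disjoint OR is addition
theorem pvLorShiftAdd (a b k : Nat) (h : a < 2 ^ k) : a ||| (b <<< k) = a + b * 2 ^ k := by
  apply Nat.eq_of_testBit_eq
  intro j
  have hrhs : a + b * 2 ^ k = 2 ^ k * b + a := by ring
  rw [Nat.testBit_lor, Nat.testBit_shiftLeft, hrhs, Nat.testBit_two_pow_mul_add b h j]
  by_cases hj : j < k
  · simp [hj, Nat.not_le.mpr hj]
  · have ha : a.testBit j = false :=
      Nat.testBit_lt_two_pow (lt_of_lt_of_le h (Nat.pow_le_pow_right (by omega) (by omega)))
    simp [hj, Nat.le_of_not_lt hj, ha]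

-- A's loop invariant
theorem pvGoEq (d : Int) (hd : 1 ≤ d) (M : Nat) (idx : Nat) (rr : Nat) (hr : rr < 2 ^ idx) :
    intBySliderGo d (M : Int) idx (rr : Int) = ((rr + pvBitsum d.toNat M * 2 ^ idx : Nat) : Int) := by
  induction M using Nat.strong_induction_on generalizing idx rr with
  | _ M ih =>
    rw [intBySliderGo]
    by_cases hM : M = 0
    · subst hM
      simp [pvBitsum]
    · have hpos : (0:Int) < (M:Int) := by exact_mod_cast Nat.pos_of_ne_zero hM
      rw [if_pos hpos, if_pos hd]
      have hcast1 : ((M:Int) >>> d.toNat) = ((M >>> d.toNat : Nat) : Int) := by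
        simp [Int.natCast_shiftRight]
      have hband : PySem.Int.band (M:Int) 1 = ((M &&& 1 : Nat) : Int) := by
        exact_mod_cast PySem.Int.band_natCast M 1
      have hshl : (((M &&& 1 : Nat) : Int) <<< idx) = (((M &&& 1) <<< idx : Nat) : Int) := by
        simp
      have hbor : PySem.Int.bor (rr : Int) (((M &&& 1) <<< idx : Nat) : Int)
          = ((rr ||| ((M &&& 1) <<< idx) : Nat) : Int) := PySem.Int.bor_natCast _ _
      rw [hband, hshl, hbor, hcast1]
      rw [pvLorShiftAdd rr (M &&& 1) idx hr]
      have hlt : M >>> d.toNat < M := by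
        rw [Nat.shiftRight_eq_div_pow]
        exact Nat.div_lt_self (Nat.pos_of_ne_zero hM) (Nat.one_lt_two_pow (by omega))
      have hrr' : rr + (M &&& 1) * 2 ^ idx < 2 ^ (idx + 1) := by
        have h1 : M &&& 1 ≤ 1 := by rw [Nat.and_one_is_mod]; omega
        have h2 := Nat.pow_lt_pow_succ (a := 2) (n := idx) (by omega)
        ring_nf
        nlinarith [hr]
      rw [ih _ hlt (idx + 1) _ hrr']
      congr 1
      rw [Nat.shiftRight_eq_div_pow, Nat.and_one_is_mod]
      conv_rhs => rw [pvBitsum]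
      rw [if_neg (by omega : ¬ (M = 0 ∨ d.toNat = 0))]
      ring

theorem pvAResult (d : Int) (hd : 1 ≤ d) (m : Int) (hm : 0 < m) :
    intBySliderGo d m 0 0 = ((pvBitsum d.toNat m.toNat : Nat) : Int) := by
  have h := pvGoEq d hd m.toNat 0 0 (by norm_num)
  rw [Int.toNat_of_nonneg hm.le] at h
  simpa using h

-- parse of a reversed list, least-significant-digit-first recursion
def pvParseLSB : List Char → Nat
  | [] => 0
  | c :: rest => (if c = '1' then 1 else 0) + 2 * pvParseLSB rest

theorem pvParse2Rev (l : List Char) : pvParse2 l.reverse = pvParseLSB l := by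
  induction l with
  | nil => rfl
  | cons c rest ih =>
    unfold pvParse2 at *
    rw [List.reverse_cons, List.foldl_append, ih, pvParseLSB]
    simp
    omega

-- LSB-first digit list peels off M % 2
theorem pvBinRevCons (M : Nat) (hM : M ≠ 0) :
    (pvBinNat M).reverse = (if M % 2 = 1 then '1' else '0') :: (pvBinNat (M / 2)).reverse := by
  conv_lhs => rw [pvBinNat]
  rw [if_neg hM, List.reverse_append]
  rfl

-- dropping k LSB digits = digits of M / 2^k
theorem pvDropBits (k : Nat) (M : Nat) :
    ((pvBinNat M).reverse).drop k = (pvBinNat (M / 2 ^ k)).reverse := by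
  induction k generalizing M with
  | zero => simp
  | succ k ih =>
    by_cases hM : M = 0
    · subst hM
      simp [pvBinNat]
    · rw [pvBinRevCons M hM, List.drop_succ_cons, ih]
      congr 2
      rw [Nat.div_div_eq_div_mul]
      congr 1
      rw [pow_succ]
      ring

-- B's pipeline computes pvBitsum
theorem pvBEq (d : Nat) (hd : 1 ≤ d) (M : Nat) :
    pvParseLSB (pvTakeEvery d ((pvBinNat M).reverse)) = pvBitsum d M := by
  induction M using Nat.strong_induction_on with
  | _ M ih =>
  by_cases hM : M = 0
  · subst hM
    have h0 : pvBinNat 0 = [] := by rw [pvBinNat]; simp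
    rw [h0]
    rw [pvTakeEvery.eq_def]
    simp [pvParseLSB, pvBitsum]
  · rw [pvBinRevCons M hM]
    simp only [pvTakeEvery]
    rw [pvDropBits, pvParseLSB]
    have he : M / 2 / 2 ^ (d - 1) = M / 2 ^ d := by
      rw [Nat.div_div_eq_div_mul]
      congr 1
      rw [← pow_succ']
      congr 1
      omega
    rw [he, ih (M / 2 ^ d) (Nat.div_lt_self (by omega) (Nat.one_lt_two_pow (by omega)))]
    conv_rhs => rw [pvBitsum]
    rw [if_neg (by omega : ¬ (M = 0 ∨ d = 0))]
    have : (if (if M % 2 = 1 then '1' else '0') = '1' then 1 else 0) = M % 2 := by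
      by_cases h : M % 2 = 1 <;> simp [h] <;> omega
    omega

-- ===== VERDICT =====
theorem int_by_slider_spec : Claim_equal_int_by_slider := by
  unfold Claim_equal_int_by_slider
  intro n d i _ hpre
  obtain ⟨hi, hor⟩ := hpre
  unfold Spec_int_by_slider int_by_slider int_by_slider_alt
  dsimp only
  rw [if_pos hi, if_pos hi]
  by_cases hm : n >>> i.toNat ≤ 0
  · rw [if_pos hm, intBySliderGo, if_neg (by omega)]
  · have hm' : 0 < n >>> i.toNat := by omega
    have hd : 1 ≤ d := by
      rcases hor with h | h
      · exact h
      · omega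
    rw [if_neg hm, pvAResult d hd _ hm', pvParse2Rev,
      pvBEq d.toNat (by omega) (n >>> i.toNat).toNat]
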